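-- pv_equiv track=rewrite | github.com/aryanshygun/Quera-Python-Beginner | Introduction to Python Programming/Finished Questions/شماره رند.py | tekrar
-- ===== SOURCE A (Python) =====
-- def tekrar(n):
--     xdict = {}
--     for o in n:
--         if o in xdict:
--             xdict[o] += 1
--         else:
--             xdict[o] = 1
--     for x, y in xdict.items():
--         if y >= 4:
--             return True
-- ===== SOURCE B (Python) =====
-- def tekrar(n):
--     s = sorted(n)
--     return True if any(a == b for a, b in zip(s, s[3:])) else None
-- ===== Notes on version B (the rewrite author's own statement) =====
-- stated objective: alternative
-- what changed: Replaced A's dict-counting two-pass structure with sort-then-window-scan: sort the characters and report True iff some character equals the one three positions later (a sorted run of length 4), preserving the implicit None return.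
import Mathlib
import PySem

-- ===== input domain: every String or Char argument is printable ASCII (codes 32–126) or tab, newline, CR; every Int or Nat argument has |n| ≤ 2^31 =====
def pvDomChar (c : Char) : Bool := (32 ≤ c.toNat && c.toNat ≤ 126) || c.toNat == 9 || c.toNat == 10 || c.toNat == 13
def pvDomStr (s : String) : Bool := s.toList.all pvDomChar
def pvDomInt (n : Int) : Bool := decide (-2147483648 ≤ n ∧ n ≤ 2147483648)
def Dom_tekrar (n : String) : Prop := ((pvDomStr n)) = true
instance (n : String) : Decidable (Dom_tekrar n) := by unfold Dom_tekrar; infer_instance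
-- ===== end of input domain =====

-- B replaces A's dict-counting two-pass structure with sort-then-window-scan (a sorted run of 4); same implicit None return.

-- ===== PORT A =====
-- second loop of A: scan the dict items for a value >= 4
def tekrarScan : List (Char × Int) → Option Bool
  | [] => none
  | (_, y) :: rest => if 4 ≤ y then some true else tekrarScan rest

def tekrar (n : String) : Option Bool :=
  tekrarScan (n.toList.foldl
    (fun d o => if d.contains o then d.insert o (d.getD o 0 + 1) else d.insert o 1)
    PySem.Dict.empty).items

-- ===== PORT B =====
def tekrar_alt (n : String) : Option Bool :=
  let s := PySem.List.sorted n.toList (fun c => c) false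
  if (s.zip (PySem.List.slice s (some 3) none)).any (fun p => p.1 == p.2) then some true
  else none

-- ===== PRECONDITION & SPEC =====
def Spec_tekrar (n : String) (out : Option Bool) : Prop := out = tekrar_alt n
instance (n : String) (out : Option Bool) : Decidable (Spec_tekrar n out) := by unfold Spec_tekrar; infer_instance

-- ===== CLAIM (what is proved, stated in full; the proofs are below) =====
def Claim_equal_tekrar : Prop := ∀ (n : String), Dom_tekrar n → Spec_tekrar n (tekrar n)

-- ===== LEMMAS AND PROOFS =====

-- A's counting loop builds exactly Counter(n)
lemma tekrar_fold_eq_counter (l : List Char) :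
    l.foldl (fun d o => if d.contains o then d.insert o (d.getD o 0 + 1) else d.insert o 1)
      PySem.Dict.empty = PySem.Dict.counter l := by
  have hfun : (fun (d : PySem.Dict Char Int) o =>
      if d.contains o then d.insert o (d.getD o 0 + 1) else d.insert o 1)
      = fun d o => d.insert o (d.getD o 0 + 1) := by
    funext d o
    by_cases h : d.contains o = true
    · simp [h]
    · have h' : d.contains o = false := by simpa using h
      simp [h', PySem.Dict.getD_of_not_contains]
  rw [hfun, PySem.Dict.foldl_insert_getD_add_one_eq_counter]

lemma tekrarScan_eq (xs : List (Char × Int)) :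
    tekrarScan xs = if ∃ p ∈ xs, 4 ≤ p.2 then some true else none := by
  induction xs with
  | nil => simp [tekrarScan]
  | cons p rest ih =>
    obtain ⟨x, y⟩ := p
    by_cases h : (4:Int) ≤ y
    · simp [tekrarScan, h]
    · simp only [tekrarScan, if_neg h, ih]
      by_cases h2 : ∃ q ∈ rest, (4:Int) ≤ q.2
      · rw [if_pos h2, if_pos]
        obtain ⟨q, hq, hq4⟩ := h2
        exact ⟨q, List.mem_cons_of_mem _ hq, hq4⟩
      · rw [if_neg h2, if_neg]
        rintro ⟨q, hq, hq4⟩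
        rcases List.mem_cons.mp hq with rfl | hq'
        · exact h hq4
        · exact h2 ⟨q, hq', hq4⟩

-- On a sorted list, some element equals the one 3 positions later iff some element has count ≥ 4
lemma win_iff_count (s : List Char) (hs : s.Pairwise (· ≤ ·)) :
    ((s.zip (s.drop 3)).any (fun p => p.1 == p.2) = true) ↔ ∃ c ∈ s, 4 ≤ s.count c := by
  induction s with
  | nil => simp
  | cons a rest ih =>
    match rest with
    | [] =>
      constructor
      · intro h; simp at h
      · rintro ⟨c, hm, h4⟩
        have h2 : List.count c [a] ≤ 1 := by simpa using List.count_le_length (l := [a]) (a := c)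
        omega
    | [b] =>
      constructor
      · intro h; simp at h
      · rintro ⟨c, hm, h4⟩
        have h2 : List.count c [a, b] ≤ 2 := by simpa using List.count_le_length (l := [a, b]) (a := c)
        omega
    | [b, c0] =>
      constructor
      · intro h; simp at h
      · rintro ⟨c, hm, h4⟩
        have h2 : List.count c [a, b, c0] ≤ 3 := by
          simpa using List.count_le_length (l := [a, b, c0]) (a := c)
        omega
    | b :: c0 :: d :: t =>
      have hrest := List.pairwise_cons.mp hs |>.2
      have ha : ∀ x ∈ b :: c0 :: d :: t, a ≤ x := (List.pairwise_cons.mp hs).1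
      have hb : ∀ x ∈ c0 :: d :: t, b ≤ x := (List.pairwise_cons.mp hrest).1
      have hc0 : ∀ x ∈ d :: t, c0 ≤ x :=
        (List.pairwise_cons.mp (List.pairwise_cons.mp hrest).2).1
      have hd : ∀ x ∈ t, d ≤ x :=
        (List.pairwise_cons.mp (List.pairwise_cons.mp
          (List.pairwise_cons.mp hrest).2).2).1
      have hzip : ((a :: b :: c0 :: d :: t).zip ((a :: b :: c0 :: d :: t).drop 3)).any
            (fun p => p.1 == p.2)
          = ((a == d) || ((b :: c0 :: d :: t).zip ((b :: c0 :: d :: t).drop 3)).any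
            (fun p => p.1 == p.2)) := by
        simp [List.zip]
      rw [hzip]
      by_cases had : a = d
      · have hba : b = a := le_antisymm (by rw [had]; exact hb d (by simp)) (ha b (by simp))
        have hca : c0 = a := le_antisymm (by rw [had]; exact hc0 d (by simp)) (ha c0 (by simp))
        have htrue : (a == d) = true := by simp [had]
        rw [htrue, Bool.true_or]
        simp only [true_iff]
        refine ⟨a, by simp, ?_⟩
        have hda : d = a := had.symm
        simp [hba, hca, hda]
      · have hane : (a == d) = false := by simp [had]
        rw [hane, Bool.false_or, ih hrest]
        have hdna : d ≠ a := fun h => had h.symm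
        have hcnta : (a :: b :: c0 :: d :: t).count a ≤ 3 := by
          have ht0 : t.count a = 0 := by
            rw [List.count_eq_zero]
            intro hmem
            exact had (le_antisymm (ha _ (by simp)) (hd _ hmem))
          simp only [List.count_cons, ht0, beq_iff_eq]
          split_ifs <;> first | omega | exact absurd ‹d = a› hdna
        constructor
        · rintro ⟨c, hm, h4⟩
          refine ⟨c, List.mem_cons_of_mem _ hm, ?_⟩
          have hcc : (a :: b :: c0 :: d :: t).count c
              = (b :: c0 :: d :: t).count c + if a == c then 1 else 0 := List.count_cons ..
          rw [hcc]
          split_ifs <;> omega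
        · rintro ⟨c, hm, h4⟩
          by_cases hca : c = a
          · subst hca
            omega
          · have hm' : c ∈ b :: c0 :: d :: t := by
              rcases List.mem_cons.mp hm with rfl | h'
              · exact absurd rfl hca
              · exact h'
            refine ⟨c, hm', ?_⟩
            have hcc : (a :: b :: c0 :: d :: t).count c
                = (b :: c0 :: d :: t).count c + if a == c then 1 else 0 := List.count_cons ..
            have hne : (a == c) = false := by simp; exact fun h => hca h.symm
            rw [hcc, hne] at h4
            simpa using h4

-- ===== VERDICT (by name: the statement is the Claim_ definition above) =====
theorem tekrar_spec : Claim_equal_tekrar := by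
  intro n _
  unfold Spec_tekrar tekrar tekrar_alt
  rw [tekrar_fold_eq_counter, PySem.Dict.items_counter, tekrarScan_eq]
  have hperm := PySem.List.sorted_perm n.toList (fun c => c) false
  have hpw : (PySem.List.sorted n.toList (fun c => c) false).Pairwise (· ≤ ·) := by
    simpa using PySem.List.sorted_pairwise n.toList (fun c => c)
  have hslice : PySem.List.slice (PySem.List.sorted n.toList (fun c => c) false) (some 3) none
      = (PySem.List.sorted n.toList (fun c => c) false).drop 3 := by
    simpa using PySem.List.slice_from_natCast (PySem.List.sorted n.toList (fun c => c) false) 3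
  simp only [hslice]
  have key : (((PySem.List.sorted n.toList (fun c => c) false).zip
        ((PySem.List.sorted n.toList (fun c => c) false).drop 3)).any (fun p => p.1 == p.2) = true)
      ↔ ∃ p ∈ (PySem.Set.ofList n.toList).map (fun c => (c, (n.toList.count c : Int))), 4 ≤ p.2 := by
    rw [win_iff_count _ hpw]
    constructor
    · rintro ⟨c, hm, h4⟩
      refine ⟨(c, (n.toList.count c : Int)),
        List.mem_map.mpr ⟨c, (PySem.Set.mem_ofList _ _).mpr (hperm.mem_iff.mp hm), rfl⟩, ?_⟩
      have := hperm.count_eq c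
      simp only []
      omega
    · rintro ⟨p, hp, h4⟩
      obtain ⟨c, hk, rfl⟩ := List.mem_map.mp hp
      have hmem : c ∈ n.toList := (PySem.Set.mem_ofList _ _).mp hk
      refine ⟨c, hperm.mem_iff.mpr hmem, ?_⟩
      have := hperm.count_eq c
      simp only [] at h4
      omega
  by_cases h : ∃ p ∈ (PySem.Set.ofList n.toList).map
      (fun c => (c, (n.toList.count c : Int))), 4 ≤ p.2
  · rw [if_pos h, if_pos (key.mpr h)]
  · rw [if_neg h, if_neg (fun hx => h (key.mp hx))]
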